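-- pv_equiv track=rewrite | github.com/gistable/gistable | all-gists/6850399/snippet.py | a_by_b_
-- ===== SOURCE A (Python) =====
-- def a_by_b_(a, b):
--     idx = {c:i for i, c in enumerate(b)}
--     m = len(b)
--     buckets = [[] for _ in range(m+1)]
--     for c in a:
--         buckets[idx.get(c, m)].append(c)
--     for l in buckets[1:]:
--         buckets[0].extend(l)
--     return ''.join(buckets[0])
-- ===== SOURCE B (Python) =====
-- def a_by_b_(a, b):
--     idx = {c: i for i, c in enumerate(b)}
--     m = len(b)
--     return ''.join(sorted(a, key=lambda c: idx.get(c, m)))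
-- ===== Notes on version B (the rewrite author's own statement) =====
-- stated objective: idiomatic
-- what changed: Replaces the explicit bucket lists (distribute into m+1 buckets, then concatenate) with a single stable comparison sort keyed by the character's index in b, unknowns keyed len(b).
import Mathlib
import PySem

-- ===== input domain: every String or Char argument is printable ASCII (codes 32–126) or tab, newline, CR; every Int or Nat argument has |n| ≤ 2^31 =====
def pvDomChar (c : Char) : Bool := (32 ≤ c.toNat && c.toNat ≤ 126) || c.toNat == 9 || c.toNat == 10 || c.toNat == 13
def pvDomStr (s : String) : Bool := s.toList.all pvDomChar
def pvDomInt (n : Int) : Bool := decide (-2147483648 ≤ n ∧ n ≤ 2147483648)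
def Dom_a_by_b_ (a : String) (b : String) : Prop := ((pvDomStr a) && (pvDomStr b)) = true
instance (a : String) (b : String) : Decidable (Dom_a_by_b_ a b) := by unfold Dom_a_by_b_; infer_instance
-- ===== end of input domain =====

-- B replaces A's explicit m+1 bucket lists (distribute, then concatenate) with one stable
-- comparison sort keyed by the character's index in b (unknowns keyed len(b)); not faster, idiomatic.

-- ===== PORT A =====
-- idx = {c:i for i, c in enumerate(b)}  (shared: both Pythons build this same map)
def pvIdxMap (bs : List Char) : PySem.Dict Char Int :=
  (PySem.List.enumerate bs 0).foldl (fun d p => d.insert p.2 p.1) (PySem.Dict.mk [])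

def a_by_b_ (a : String) (b : String) : String :=
  let bs := b.toList
  let idx := pvIdxMap bs
  let m : Int := (bs.length : Int)
  -- buckets = [[] for _ in range(m+1)]
  let buckets0 : List (List Char) := List.replicate (bs.length + 1) []
  -- for c in a: buckets[idx.get(c, m)].append(c)   (idx values are 0..m-1, so toNat is exact)
  let buckets := a.toList.foldl
    (fun bk c => bk.set (idx.getD c m).toNat (bk.getD (idx.getD c m).toNat [] ++ [c])) buckets0
  -- for l in buckets[1:]: buckets[0].extend(l)
  let b0 := (PySem.List.slice buckets (some 1) none).foldl (fun acc l => acc ++ l) (buckets.getD 0 [])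
  String.ofList b0

-- ===== PORT B =====
def a_by_b__alt (a : String) (b : String) : String :=
  let bs := b.toList
  let idx := pvIdxMap bs
  let m : Int := (bs.length : Int)
  String.ofList (PySem.List.sorted a.toList (fun c => idx.getD c m) false)

-- ===== PRECONDITION & SPEC =====
def Spec_a_by_b_ (a : String) (b : String) (out : String) : Prop := out = a_by_b__alt a b
instance (a : String) (b : String) (out : String) : Decidable (Spec_a_by_b_ a b out) := by unfold Spec_a_by_b_; infer_instance

-- ===== CLAIM (what is proved, stated in full; the proofs are below) =====
def Claim_equal_a_by_b_ : Prop := ∀ (a : String) (b : String), Dom_a_by_b_ a b → Spec_a_by_b_ a b (a_by_b_ a b)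

-- ===== LEMMAS AND PROOFS =====

-- the value idx.get(c, m) is always between 0 and m
theorem pvKey_bounds (bs : List Char) (c : Char) :
    0 ≤ (pvIdxMap bs).getD c (bs.length : Int) ∧ (pvIdxMap bs).getD c (bs.length : Int) ≤ (bs.length : Int) := by
  have h : ∀ (ps : List (Int × Char)) (d : PySem.Dict Char Int),
      (∀ p ∈ ps, 0 ≤ p.1 ∧ p.1 ≤ (bs.length : Int)) →
      (0 ≤ d.getD c (bs.length : Int) ∧ d.getD c (bs.length : Int) ≤ (bs.length : Int)) →
      0 ≤ (ps.foldl (fun d p => d.insert p.2 p.1) d).getD c (bs.length : Int) ∧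
      (ps.foldl (fun d p => d.insert p.2 p.1) d).getD c (bs.length : Int) ≤ (bs.length : Int) := by
    intro ps
    induction ps with
    | nil => intro d _ hd; simpa using hd
    | cons p t ih =>
      intro d hps hd
      refine ih _ (fun q hq => hps q (by simp [hq])) ?_
      rw [PySem.Dict.getD_insert]
      split
      · exact hps p (by simp)
      · exact hd
  refine h _ _ ?_ ?_
  · intro p hp
    rcases (PySem.List.mem_enumerate_iff _ _ _).1 hp with ⟨k, hk, rfl⟩
    simp; omega
  · constructor <;> simp [PySem.Dict.getD, PySem.Dict.get?]

theorem insertBy_append_left {α : Type} (bf : α → α → Bool) (x : α) (L1 L2 : List α)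
    (h : ∀ y ∈ L1, bf x y = false) :
    PySem.List.insertBy bf x (L1 ++ L2) = L1 ++ PySem.List.insertBy bf x L2 := by
  induction L1 with
  | nil => simp
  | cons y t ih =>
    have hy : bf x y = false := h y (by simp)
    simp [PySem.List.insertBy, hy, ih (fun z hz => h z (by simp [hz]))]

theorem insertBy_all_before {α : Type} (bf : α → α → Bool) (x : α) (L : List α)
    (h : ∀ y ∈ L, bf x y = true) :
    PySem.List.insertBy bf x L = x :: L := by
  cases L with
  | nil => simp [PySem.List.insertBy]
  | cons y t => simp [PySem.List.insertBy, h y (by simp)]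

-- stable sort with Int keys in [0, n] is the bucket concatenation
theorem sorted_eq_buckets {α : Type} (key : α → Int) (n : Nat) (xs : List α)
    (h : ∀ x ∈ xs, 0 ≤ key x ∧ key x ≤ (n : Int)) :
    PySem.List.sorted xs key false =
      (List.range (n + 1)).flatMap (fun i : Nat => xs.filter (fun x => key x == (i : Int))) := by
  induction xs using List.reverseRecOn with
  | nil => rw [PySem.List.sorted_eq_foldl_insertBy]; simp
  | append_singleton xs x ih =>
    have hx := h x (by simp)
    have hxs : ∀ y ∈ xs, 0 ≤ key y ∧ key y ≤ (n : Int) := fun y hy => h y (by simp [hy])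
    have hsort : PySem.List.sorted (xs ++ [x]) key false =
        PySem.List.insertBy (fun a b => decide (key a < key b)) x (PySem.List.sorted xs key false) := by
      rw [PySem.List.sorted_eq_foldl_insertBy, PySem.List.sorted_eq_foldl_insertBy, List.foldl_append]
      simp
    set k : Nat := (key x).toNat with hk
    have hkx : key x = (k : Int) := by omega
    have hkn : k ≤ n := by omega
    have hsplit : n + 1 = (k + 1) + (n - k) := by omega
    rw [hsort, ih hxs]
    -- new filters for xs ++ [x]
    have hfilt : ∀ i : Nat,
        (xs ++ [x]).filter (fun y => key y == (i : Int)) =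
        xs.filter (fun y => key y == (i : Int)) ++ (if i = k then [x] else []) := by
      intro i
      rw [List.filter_append]
      congr 1
      by_cases hik : i = k
      · simp [hik, hkx]
      · have : ¬ (key x = (i : Int)) := by omega
        simp [hik, this]
    -- split the range
    rw [hsplit, List.range_add, List.flatMap_append, List.flatMap_append]
    have hL1 : ∀ y ∈ (List.range (k + 1)).flatMap
        (fun i : Nat => xs.filter (fun z => key z == (i : Int))),
        (decide (key x < key y)) = false := by
      intro y hy
      rcases List.mem_flatMap.1 hy with ⟨i, hi, hyf⟩
      have hi' : i < k + 1 := List.mem_range.1 hi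
      have := (List.mem_filter.1 hyf).2
      have : key y = (i : Int) := by simpa using this
      simp only [decide_eq_false_iff_not, not_lt]
      omega
    rw [insertBy_append_left _ _ _ _ hL1]
    have hL2 : ∀ y ∈ ((List.range (n - k)).map (fun j => (k + 1) + j)).flatMap
        (fun i : Nat => xs.filter (fun z => key z == (i : Int))),
        (decide (key x < key y)) = true := by
      intro y hy
      rcases List.mem_flatMap.1 hy with ⟨i, hi, hyf⟩
      rcases List.mem_map.1 hi with ⟨j, _, rfl⟩
      have := (List.mem_filter.1 hyf).2
      have : key y = ((k + 1 + j : Nat) : Int) := by simpa using this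
      simp only [decide_eq_true_eq]
      omega
    rw [insertBy_all_before _ _ _ hL2]
    -- right-hand side: only bucket k changes, and it is the last bucket of the first part
    have hpart2 : ∀ i ∈ (List.range (n - k)).map (fun j => (k + 1) + j),
        (xs ++ [x]).filter (fun y => key y == (i : Int)) = xs.filter (fun y => key y == (i : Int)) := by
      intro i hi
      rcases List.mem_map.1 hi with ⟨j, _, rfl⟩
      rw [hfilt]
      simp [Nat.ne_of_gt (by omega : k < k + 1 + j)]
    have hpart1 : (List.range (k + 1)).flatMap (fun i : Nat => (xs ++ [x]).filter (fun y => key y == (i : Int))) =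
        (List.range (k + 1)).flatMap (fun i : Nat => xs.filter (fun y => key y == (i : Int))) ++ [x] := by
      rw [List.range_succ, List.flatMap_append, List.flatMap_append]
      simp only [List.flatMap_cons, List.flatMap_nil, List.append_nil]
      rw [hfilt k]
      have : ∀ i ∈ List.range k, (xs ++ [x]).filter (fun y => key y == (i : Int)) =
          xs.filter (fun y => key y == (i : Int)) := by
        intro i hi
        rw [hfilt]
        simp [Nat.ne_of_lt (List.mem_range.1 hi)]
      rw [List.flatMap_congr this]
      simp
    rw [hpart1, List.flatMap_congr hpart2]
    simp

-- the bucket-distribution loop computes per-index filters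
theorem foldl_buckets {α : Type} (kf : α → Nat) (n : Nat) (xs : List α)
    (h : ∀ x ∈ xs, kf x ≤ n) :
    xs.foldl (fun bk x => bk.set (kf x) (bk.getD (kf x) [] ++ [x])) (List.replicate (n + 1) ([] : List α)) =
      (List.range (n + 1)).map (fun i => xs.filter (fun x => kf x == i)) := by
  induction xs using List.reverseRecOn with
  | nil =>
    apply List.ext_getElem <;> simp
  | append_singleton xs x ih =>
    have hx := h x (by simp)
    have hxs : ∀ y ∈ xs, kf y ≤ n := fun y hy => h y (by simp [hy])
    rw [List.foldl_append, ih hxs]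
    simp only [List.foldl_cons, List.foldl_nil]
    apply List.ext_getElem
    · simp
    · intro i hi hi'
      simp only [List.length_map, List.length_range] at hi'
      rw [List.getElem_set]
      have hgd : ((List.range (n + 1)).map (fun i => xs.filter (fun y => kf y == i))).getD (kf x) [] =
          xs.filter (fun y => kf y == kf x) := by
        rw [List.getD_eq_getElem _ _ (by simp; omega)]
        simp
      split_ifs with hik
      · subst hik
        rw [hgd]
        simp [List.filter_append]
      · simp only [List.getElem_map, List.getElem_range]
        simp [List.filter_append, hik]

-- ===== VERDICT (by name: the statement is the Claim_ definition above) =====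
theorem a_by_b__spec : Claim_equal_a_by_b_ := by
  intro a b _
  unfold Spec_a_by_b_ a_by_b_ a_by_b__alt
  simp only []
  set bs := b.toList
  set key : Char → Int := fun c => (pvIdxMap bs).getD c (bs.length : Int) with hkey
  set n := bs.length
  have hb : ∀ c, 0 ≤ key c ∧ key c ≤ (n : Int) := fun c => pvKey_bounds bs c
  have hkf : ∀ c, (key c).toNat ≤ n := fun c => by have := hb c; omega
  -- the two bucket tests agree: comparing toNat against a Nat is comparing the Int key against its cast
  have hconv : ∀ i ∈ List.range (n + 1),
      a.toList.filter (fun c => (key c).toNat == i) = a.toList.filter (fun c => key c == (i : Int)) := by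
    intro i _
    apply List.filter_congr
    intro c _
    have := hb c
    by_cases hc : key c = (i : Int)
    · have h2 : (key c).toNat = i := by omega
      simp [hc]
    · have h2 : (key c).toNat ≠ i := by omega
      simp [hc, h2]
  -- A side: the distribution loop builds the per-index filters, then they are concatenated
  rw [foldl_buckets (fun c => (key c).toNat) n a.toList (fun c _ => hkf c)]
  rw [List.map_eq_map_iff.mpr hconv]
  rw [PySem.List.slice_from _ (by norm_num)]
  rw [PySem.List.foldl_append_eq_flatten]
  -- B side: the stable sort is the same concatenation of filters
  rw [sorted_eq_buckets key n a.toList (fun c _ => hb c), List.flatMap_def]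
  have hrange : List.range (n + 1) = 0 :: (List.range n).map (fun i => 1 + i) := by
    rw [show n + 1 = 1 + n by omega, List.range_add]
    simp
  rw [hrange]
  simp
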